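-- pv_equiv track=rewrite | github.com/ehdrb5011992/Python | Self_study/2020_Winter/2. Algorithms with Python/파이썬 알고리즘 문제 및 채점/섹션5. 자료구조 활용 (스택, 큐, 해쉬, 힙)/8. 단어찾기/AA.py | solution
-- ===== SOURCE A (Python) =====
-- def solution(words,poet):
--     word_dict={}
--     for i in words:
--         word_dict[i]=0
--     for i in poet:
--         word_dict[i]+=1
--
--     for key,value in word_dict.items():
--         if value==0:
--             return key
-- ===== SOURCE B (Python) =====
-- def solution(words, poet):
--     sp = sorted(poet)
--     n = len(sp)
--     for w in words:
--         lo, hi = 0, n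
--         while lo < hi:
--             mid = (lo + hi) // 2
--             if sp[mid] < w:
--                 lo = mid + 1
--             else:
--                 hi = mid
--         if lo == n or sp[lo] != w:
--             return w
-- ===== Notes on version B (the rewrite author's own statement) =====
-- stated objective: alternative
-- what changed: B replaces A's hash-count passes (init dict over words, count poet, scan the count table) by sort-then-binary-search: it sorts poet once and returns the first word whose hand-written lower-bound binary search misses in the sorted list.
import Mathlib
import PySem

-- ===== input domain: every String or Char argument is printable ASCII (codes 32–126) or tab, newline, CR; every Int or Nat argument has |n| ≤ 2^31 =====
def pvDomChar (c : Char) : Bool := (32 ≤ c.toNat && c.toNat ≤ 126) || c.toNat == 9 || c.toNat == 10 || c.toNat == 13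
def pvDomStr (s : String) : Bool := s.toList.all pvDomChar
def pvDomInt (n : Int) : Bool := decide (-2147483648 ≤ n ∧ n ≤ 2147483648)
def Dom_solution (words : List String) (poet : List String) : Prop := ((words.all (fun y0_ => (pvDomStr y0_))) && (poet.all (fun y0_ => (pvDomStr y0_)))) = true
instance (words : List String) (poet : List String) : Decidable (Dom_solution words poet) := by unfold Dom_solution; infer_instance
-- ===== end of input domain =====

-- B replaces A's hash-count passes by sort-then-binary-search over poet (alternative algorithm, not claimed faster).


-- ===== PORT A =====
def solution (words : List String) (poet : List String) : Option String :=
  let word_dict : PySem.Dict String Int :=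
    words.foldl (fun d i => d.insert i 0) PySem.Dict.empty
  -- 'word_dict[i] += 1' ported with modify (default 0): exact wherever i is a key,
  -- i.e. on all inputs admitted by Pre_solution; Python raises KeyError otherwise
  let word_dict := poet.foldl (fun d i => d.modify i 0 (fun v => v + 1)) word_dict
  (word_dict.items.find? (fun kv => kv.2 == 0)).map (fun kv => kv.1)

-- ===== PORT B =====
-- the hand-written 'while lo < hi' lower-bound loop of Source B; fuel = sp.length bounds the
-- iteration count (the interval [lo,hi) shrinks each step), matching PySem's own loop style.
-- sp[mid] is ported as getD with a dummy default: 0 ≤ lo ≤ mid < hi ≤ len(sp) always holds.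
def lowerBoundLoop (sp : List String) (w : String) : Nat → Nat → Nat → Nat
  | 0, lo, _ => lo
  | fuel + 1, lo, hi =>
    if lo < hi then
      let mid := (lo + hi) / 2
      if sp.getD mid "" < w then lowerBoundLoop sp w fuel (mid + 1) hi
      else lowerBoundLoop sp w fuel lo mid
    else lo

def solution_alt (words : List String) (poet : List String) : Option String :=
  let sp := PySem.List.sorted poet (fun x => x) false
  let n := sp.length
  words.find? (fun w =>
    let lo := lowerBoundLoop sp w n 0 n
    decide (lo = n) || !(sp.getD lo "" == w))

-- ===== PRECONDITION & SPEC =====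
-- Pre_ excludes exactly the inputs where poet contains a string absent from words: there A raises KeyError
def Pre_solution (words : List String) (poet : List String) : Prop := ∀ x ∈ poet, x ∈ words
instance (words : List String) (poet : List String) : Decidable (Pre_solution words poet) := by unfold Pre_solution; infer_instance
def pvWitness_solution : List String × List String := (["a", "b"], ["a", "a"])

def Spec_solution (words : List String) (poet : List String) (out : Option String) : Prop := out = solution_alt words poet
instance (words : List String) (poet : List String) (out : Option String) : Decidable (Spec_solution words poet out) := by unfold Spec_solution; infer_instance

-- ===== CLAIM (what is proved, stated in full; the proofs are below) =====
def Claim_equal_solution : Prop := ∀ (words : List String) (poet : List String), Dom_solution words poet → Pre_solution words poet → Spec_solution words poet (solution words poet)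

-- ===== LEMMAS AND PROOFS =====

-- every value in A's first-pass dictionary is 0
lemma getD_foldl_insert_zero (ws : List String) (d : PySem.Dict String Int) (k : String)
    (h : d.getD k 0 = 0) : (ws.foldl (fun d i => d.insert i 0) d).getD k 0 = 0 := by
  induction ws generalizing d with
  | nil => exact h
  | cons x t ih =>
    simp only [List.foldl_cons]
    apply ih
    rw [PySem.Dict.getD_insert]
    split <;> simp [h]

-- find? over a set updated with xs is find? over the set, else find? over xs
lemma find?_set_update (p : String → Bool) (s : PySem.Set String) (xs : List String) :
    List.find? p (PySem.Set.update s xs) = (List.find? p s).or (List.find? p xs) := by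
  induction xs generalizing s with
  | nil => simp [PySem.Set.update]
  | cons x t ih =>
    have hupd : PySem.Set.update s (x :: t) = PySem.Set.update (PySem.Set.add s x) t := rfl
    rw [hupd, ih]
    by_cases hx : x ∈ s
    · have hadd : PySem.Set.add s x = s := by simp [PySem.Set.add, hx]
      rw [hadd]
      by_cases hp : p x
      · have hs : (List.find? p s).isSome := List.find?_isSome.mpr ⟨x, hx, hp⟩
        cases h : List.find? p s with
        | none => simp [h] at hs
        | some v => simp [List.find?, hp]
      · simp [List.find?, hp]
    · have hadd : PySem.Set.add s x = s ++ [x] := by simp [PySem.Set.add, hx]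
      rw [hadd, List.find?_append, Option.or_assoc]
      congr 1
      by_cases hp : p x <;> simp [List.find?, hp]

lemma find?_set_ofList (p : String → Bool) (xs : List String) :
    List.find? p (PySem.Set.ofList xs) = List.find? p xs := by
  have h := find?_set_update p PySem.Set.empty xs
  rw [PySem.Set.ofList_eq_foldl]
  simpa [PySem.Set.empty, PySem.Set.update] using h

-- A equals one scan of words for the first word not occurring in poet
lemma solution_eq_find (words poet : List String) :
    solution words poet
      = words.find? (fun w => !(PySem.Set.contains (PySem.Set.ofList poet) w)) := by
  unfold solution
  simp only []
  set d0 : PySem.Dict String Int :=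
    words.foldl (fun d i => d.insert i 0) PySem.Dict.empty with hd0
  set d1 : PySem.Dict String Int :=
    poet.foldl (fun d i => d.modify i 0 (fun v => v + 1)) d0 with hd1
  have hk0 : d0.keys = PySem.Set.ofList words := by
    rw [hd0, PySem.Dict.keys_foldl_insert words (fun _ _ => (0 : Int)) PySem.Dict.empty,
        PySem.Set.ofList_eq_foldl]
    rfl
  have hnod0 : d0.keys.Nodup := by
    rw [hk0]; exact PySem.Set.nodup_ofList words
  have hk1 : d1.keys = PySem.Set.update (PySem.Set.ofList words) poet := by
    rw [hd1, PySem.Dict.keys_foldl_modify poet (0 : Int) (fun _ _ v => v + 1) d0, hk0]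
  have hnod1 : d1.keys.Nodup := by
    rw [hd1]
    exact PySem.Dict.nodup_keys_foldl_modify_key poet id (0 : Int) (fun _ _ v => v + 1) d0 hnod0
  have hget : ∀ k, d1.getD k 0 = (poet.count k : Int) := by
    intro k
    rw [hd1, PySem.Dict.getD_foldl_modify_add_one poet d0 k,
        getD_foldl_insert_zero words PySem.Dict.empty k (by simp [PySem.Dict.getD_empty])]
    ring
  rw [PySem.Dict.items_eq_map_keys d1 hnod1 0, List.find?_map, Option.map_map]
  have hpred : ((fun kv : String × Int => kv.2 == 0) ∘ fun k => (k, d1.getD k 0))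
      = (fun w => !(PySem.Set.contains (PySem.Set.ofList poet) w)) := by
    funext k
    simp only [Function.comp, hget]
    by_cases h : k ∈ poet
    · have : poet.count k ≠ 0 := by simpa [List.count_eq_zero] using h
      simp [PySem.Set.contains, PySem.Set.mem_ofList, h, this]
    · have : poet.count k = 0 := by simpa [List.count_eq_zero] using h
      simp [PySem.Set.contains, PySem.Set.mem_ofList, h, this]
  rw [hpred]
  have hmapid : ((fun kv : String × Int => kv.1) ∘ fun k => (k, d1.getD k 0)) = id := rfl
  rw [hmapid, Option.map_id]
  rw [hk1, find?_set_update]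
  have hnone : List.find? (fun w => !(PySem.Set.contains (PySem.Set.ofList poet) w)) poet
      = none := by
    apply List.find?_eq_none.mpr
    intro x hx
    simp [PySem.Set.contains, PySem.Set.mem_ofList, hx]
  rw [hnone, Option.or_none, find?_set_ofList]
  rfl

-- correctness of the hand-written lower-bound loop on a sorted list
lemma lowerBoundLoop_spec (sp : List String) (w : String)
    (hsort : sp.Pairwise (· ≤ ·)) :
    ∀ (fuel lo hi : Nat), lo ≤ hi → hi ≤ sp.length → hi - lo ≤ fuel →
    (∀ i, i < lo → (h : i < sp.length) → sp[i] < w) →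
    (∀ i, hi ≤ i → (h : i < sp.length) → ¬ sp[i] < w) →
    lowerBoundLoop sp w fuel lo hi ≤ sp.length ∧
    (∀ i, i < lowerBoundLoop sp w fuel lo hi → (h : i < sp.length) → sp[i] < w) ∧
    (∀ i, lowerBoundLoop sp w fuel lo hi ≤ i → (h : i < sp.length) → ¬ sp[i] < w) := by
  have hmono : ∀ (p q : Nat), (hpq : p ≤ q) → (hq : q < sp.length) → sp[p]'(by omega) ≤ sp[q] := by
    intro p q hpq hq
    rcases eq_or_lt_of_le hpq with rfl | hlt
    · exact le_refl _
    · exact (List.pairwise_iff_getElem.mp hsort) p q (lt_trans hlt hq) hq hlt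
  intro fuel
  induction fuel with
  | zero =>
    intro lo hi hlh hhl hfuel hinvlo hinvhi
    have heq : lo = hi := by omega
    subst heq
    simp only [lowerBoundLoop]
    exact ⟨by omega, hinvlo, fun i hi' h => hinvhi i hi' h⟩
  | succ fuel ih =>
    intro lo hi hlh hhl hfuel hinvlo hinvhi
    simp only [lowerBoundLoop]
    by_cases hcase : lo < hi
    · simp only [if_pos hcase]
      have hmidlt : (lo + hi) / 2 < hi := by omega
      have hmidge : lo ≤ (lo + hi) / 2 := by omega
      have hmidlen : (lo + hi) / 2 < sp.length := by omega
      have hgetD : sp.getD ((lo + hi) / 2) "" = sp[(lo + hi) / 2] :=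
        List.getD_eq_getElem sp "" hmidlen
      by_cases hlt : sp.getD ((lo + hi) / 2) "" < w
      · simp only [if_pos hlt]
        apply ih ((lo + hi) / 2 + 1) hi (by omega) hhl (by omega)
        · intro i hi' h
          rcases Nat.lt_or_ge i lo with h2 | h2
          · exact hinvlo i h2 h
          · calc sp[i] ≤ sp[(lo + hi) / 2] := hmono i _ (by omega) hmidlen
              _ < w := by rwa [hgetD] at hlt
        · exact hinvhi
      · simp only [if_neg hlt]
        apply ih lo ((lo + hi) / 2) (by omega) (by omega) (by omega) hinvlo
        intro i hi' h
        have hw : w ≤ sp[(lo + hi) / 2] := by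
          rw [hgetD] at hlt; exact not_lt.mp hlt
        exact not_lt.mpr (le_trans hw (hmono _ i hi' h))
    · simp only [if_neg hcase]
      have : lo = hi := by omega
      exact ⟨by omega, hinvlo, fun i hi' h => hinvhi i (this ▸ hi') h⟩

-- the binary-search-miss test decides non-membership in the sorted list
lemma bsearch_miss_iff (sp : List String) (w : String) (hsort : sp.Pairwise (· ≤ ·)) :
    (decide (lowerBoundLoop sp w sp.length 0 sp.length = sp.length)
      || !(sp.getD (lowerBoundLoop sp w sp.length 0 sp.length) "" == w))
      = !(decide (w ∈ sp)) := by
  obtain ⟨hle, hlo, hhi⟩ :=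
    lowerBoundLoop_spec sp w hsort sp.length 0 sp.length (Nat.zero_le _) (le_refl _)
      (by omega) (by omega) (by omega)
  set r := lowerBoundLoop sp w sp.length 0 sp.length with hr
  by_cases hmem : w ∈ sp
  · obtain ⟨j, hj, hjw⟩ := List.getElem_of_mem hmem
    have hrlt : r < sp.length := by
      rcases Nat.lt_or_ge r sp.length with h | h
      · exact h
      · exact absurd (hlo j (by omega) hj) (by simp [hjw])
    have hrj : r ≤ j := by
      by_contra h
      exact absurd (hlo j (by omega) hj) (by simp [hjw])
    have hwr : w ≤ sp[r] := not_lt.mp (hhi r (le_refl _) hrlt)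
    have hrw : sp[r] ≤ w := by
      rcases Nat.lt_or_ge r j with h | h
      · exact hjw ▸ (List.pairwise_iff_getElem.mp hsort) r j hrlt hj h
      · have : r = j := by omega
        exact le_of_eq (this ▸ hjw)
    have heq : sp[r]?.getD "" = w := by
      rw [List.getElem?_eq_getElem hrlt]
      exact le_antisymm hrw hwr
    simp [hmem, heq, Nat.ne_of_lt hrlt]
  · rcases Nat.lt_or_ge r sp.length with h | h
    · have hmemr : sp[r] ∈ sp := List.getElem_mem h
      have hne : sp[r] ≠ w := fun he => hmem (he ▸ hmemr)
      simp [hmem, List.getElem?_eq_getElem h, hne]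
    · have : r = sp.length := by omega
      simp [hmem, this]

-- B equals the same scan of words
lemma solution_alt_eq_find (words poet : List String) :
    solution_alt words poet
      = words.find? (fun w => !(PySem.Set.contains (PySem.Set.ofList poet) w)) := by
  unfold solution_alt
  simp only []
  congr 1
  funext w
  have hsort : (PySem.List.sorted poet (fun x => x) false).Pairwise (· ≤ ·) :=
    PySem.List.sorted_pairwise poet (fun x => x)
  rw [bsearch_miss_iff _ w hsort]
  have : w ∈ PySem.List.sorted poet (fun x => x) false ↔ w ∈ poet :=
    PySem.List.mem_sorted poet (fun x => x) false w
  by_cases h : w ∈ poet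
  · simp [PySem.Set.contains, PySem.Set.mem_ofList, h, this.mpr h]
  · simp [PySem.Set.contains, PySem.Set.mem_ofList, h, this]

-- ===== VERDICT (by name: the statement is the Claim_ definition above) =====
theorem solution_spec : Claim_equal_solution := by
  unfold Claim_equal_solution
  intro words poet _ _
  unfold Spec_solution
  rw [solution_eq_find, solution_alt_eq_find]
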